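-- pv_equiv track=rewrite | github.com/pypi-data/pypi-mirror-385 | packages/coffee-maker/coffee_maker-0.1.4.tar.gz/coffee_maker-0.1.4/coffee_maker/orchestrator/parallel_execution_coordinator.py | _select_parallel_priorities
-- ===== SOURCE A (Python) =====
-- from typing import Any, Dict, List, Optional, Tuple
--
-- def _select_parallel_priorities(
--     priority_ids: List[int], independent_pairs: List[Tuple[int, int]], max_count: int
-- ) -> List[int]:
--     """Select priorities to run in parallel.
--
--     Args:
--         priority_ids: List of PRIORITY numbers
--         independent_pairs: List of (priority_a, priority_b) independent pairs
--         max_count: Maximum number of priorities to select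
--
--     Returns:
--         List of selected priority IDs
--     """
--     # Simple greedy selection: pick first N priorities that form independent pairs
--     selected = []
--
--     # Try to find a set of N priorities where all pairs are independent
--     for priority in priority_ids:
--         if len(selected) >= max_count:
--             break
--
--         # Check if this priority is independent of all selected priorities
--         is_independent = True
--         for other_priority in selected:
--             pair = tuple(sorted([priority, other_priority]))
--             if pair not in independent_pairs:
--                 is_independent = False
--                 break
--
--         if is_independent:
--             selected.append(priority)
--
--     return selected
-- ===== SOURCE B (Python) =====
-- from typing import List, Tuple
--
-- def _select_parallel_priorities(
--     priority_ids: List[int], independent_pairs: List[Tuple[int, int]], max_count: int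
-- ) -> List[int]:
--     """Greedy selection maintaining the set of still-admissible candidates.
--
--     Instead of re-checking every selected priority against the pair list for
--     each candidate, keep 'allowed' = the intersection of the neighbor sets of
--     all selected priorities (None = unconstrained); a candidate is admitted
--     iff it lies in 'allowed'.
--     """
--     selected = []
--     allowed = None  # None means "nothing selected yet": every candidate admissible
--     for priority in priority_ids:
--         if len(selected) >= max_count:
--             break
--         if allowed is None or priority in allowed:
--             selected.append(priority)
--             neighbors = {
--                 b if a == priority else a
--                 for a, b in independent_pairs
--                 if a <= b and priority in (a, b)
--             }
--             allowed = neighbors if allowed is None else allowed & neighbors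
--     return selected
-- ===== Notes on version B (the rewrite author's own statement) =====
-- stated objective: faster
-- what changed: Replaces A's inner rescan of all selected priorities per candidate with a maintained 'allowed' set (the running intersection of the neighbor sets of the selected priorities), so admitting a candidate is one set-membership test.
import Mathlib
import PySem

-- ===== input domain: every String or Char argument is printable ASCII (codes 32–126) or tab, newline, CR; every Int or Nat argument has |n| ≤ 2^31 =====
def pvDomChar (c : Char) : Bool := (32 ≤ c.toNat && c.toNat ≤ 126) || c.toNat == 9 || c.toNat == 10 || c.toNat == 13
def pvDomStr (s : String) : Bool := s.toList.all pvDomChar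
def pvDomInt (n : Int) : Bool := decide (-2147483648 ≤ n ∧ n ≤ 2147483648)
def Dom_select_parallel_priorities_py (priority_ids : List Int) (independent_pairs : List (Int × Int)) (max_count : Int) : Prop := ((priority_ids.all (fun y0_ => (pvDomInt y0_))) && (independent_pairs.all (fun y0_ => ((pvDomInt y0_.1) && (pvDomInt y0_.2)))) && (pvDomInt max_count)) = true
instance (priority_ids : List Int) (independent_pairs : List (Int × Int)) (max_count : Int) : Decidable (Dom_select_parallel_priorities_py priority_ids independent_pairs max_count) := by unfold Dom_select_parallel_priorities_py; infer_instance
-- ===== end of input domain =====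

-- B replaces A's inner rescan of selected priorities with a maintained intersection-of-neighbors
-- 'allowed' set, making candidate admission a single membership test (objective: faster).

-- ===== PORT A =====
-- tuple(sorted([p, o])) on the two-element list
def spA_pair (p o : Int) : Int × Int :=
  match PySem.List.sorted [p, o] (fun x => x) with
  | [x, y] => (x, y)
  | _ => (p, o)  -- unreachable: sorted of a 2-list has 2 elements

-- inner loop: is_independent with early break on the first missing pair
def spA_isIndep (pairs : List (Int × Int)) (p : Int) : List Int → Bool
  | [] => true
  | o :: rest => if pairs.contains (spA_pair p o) then spA_isIndep pairs p rest else false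

-- outer loop over priority_ids with the max_count break
def spA_loop (pairs : List (Int × Int)) (mc : Int) (selected : List Int) : List Int → List Int
  | [] => selected
  | p :: rest =>
    if (selected.length : Int) ≥ mc then selected
    else if spA_isIndep pairs p selected then spA_loop pairs mc (selected ++ [p]) rest
    else spA_loop pairs mc selected rest

def select_parallel_priorities_py (priority_ids : List Int) (independent_pairs : List (Int × Int)) (max_count : Int) : List Int :=
  spA_loop independent_pairs max_count [] priority_ids

-- ===== PORT B =====
-- the set comprehension {b if a == priority else a for (a, b) in pairs if a <= b and priority in (a, b)}
def spB_nbrs (pairs : List (Int × Int)) (p : Int) : PySem.Set Int :=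
  PySem.Set.ofList ((pairs.filter (fun ab => ab.1 ≤ ab.2 && (p == ab.1 || p == ab.2))).map
    (fun ab => if ab.1 == p then ab.2 else ab.1))

-- 'allowed is None or priority in allowed'
def spB_admits (allowed : Option (PySem.Set Int)) (p : Int) : Bool :=
  match allowed with
  | none => true
  | some s => s.contains p

def spB_loop (pairs : List (Int × Int)) (mc : Int) (selected : List Int)
    (allowed : Option (PySem.Set Int)) : List Int → List Int
  | [] => selected
  | p :: rest =>
    if (selected.length : Int) ≥ mc then selected
    else if spB_admits allowed p then
      spB_loop pairs mc (selected ++ [p])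
        (some (match allowed with
               | none => spB_nbrs pairs p
               | some s => PySem.Set.inter s (spB_nbrs pairs p))) rest
    else spB_loop pairs mc selected allowed rest

def select_parallel_priorities_py_alt (priority_ids : List Int) (independent_pairs : List (Int × Int)) (max_count : Int) : List Int :=
  spB_loop independent_pairs max_count [] none priority_ids

-- ===== PRECONDITION & SPEC =====
def Spec_select_parallel_priorities_py (priority_ids : List Int) (independent_pairs : List (Int × Int)) (max_count : Int) (out : List Int) : Prop := out = select_parallel_priorities_py_alt priority_ids independent_pairs max_count
instance (priority_ids : List Int) (independent_pairs : List (Int × Int)) (max_count : Int) (out : List Int) : Decidable (Spec_select_parallel_priorities_py priority_ids independent_pairs max_count out) := by unfold Spec_select_parallel_priorities_py; infer_instance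

-- ===== CLAIM (what is proved, stated in full; the proofs are below) =====
def Claim_equal_select_parallel_priorities_py : Prop := ∀ (priority_ids : List Int) (independent_pairs : List (Int × Int)) (max_count : Int), Dom_select_parallel_priorities_py priority_ids independent_pairs max_count → Spec_select_parallel_priorities_py priority_ids independent_pairs max_count (select_parallel_priorities_py priority_ids independent_pairs max_count)

-- ===== LEMMAS AND PROOFS =====

theorem spA_pair_eq (p o : Int) : spA_pair p o = if p ≤ o then (p, o) else (o, p) := by
  rcases lt_trichotomy p o with h | rfl | h
  · simp [spA_pair,
      PySem.List.sorted_eq_of_perm_of_pairwise_lt [p, o] [p, o] (fun x => x) (List.Perm.refl _)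
        (by simpa using h), le_of_lt h]
  · simp [spA_pair, PySem.List.sorted_eq_self_of_pairwise [p, p] (fun x => x) (by simp)]
  · simp [spA_pair,
      PySem.List.sorted_eq_of_perm_of_pairwise_lt [p, o] [o, p] (fun x => x) (List.Perm.swap _ _ _)
        (by simpa using h), not_le.mpr h]

theorem contains_nbrs (pairs : List (Int × Int)) (s q : Int) :
    (spB_nbrs pairs s).contains q = pairs.contains (spA_pair q s) := by
  apply Bool.coe_iff_coe.mp
  rw [PySem.Set.contains, List.contains_iff_mem, List.contains_iff_mem, spB_nbrs,
    PySem.Set.mem_ofList, List.mem_map, spA_pair_eq]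
  constructor
  · rintro ⟨⟨a, b⟩, hab, hq⟩
    rw [List.mem_filter] at hab
    obtain ⟨hmem, hcond⟩ := hab
    simp only [beq_iff_eq, Bool.and_eq_true, Bool.or_eq_true, decide_eq_true_eq] at hcond hq
    have : (if q ≤ s then (q, s) else (s, q)) = (a, b) := by
      split <;> (split at hq <;> (refine Prod.ext ?_ ?_ <;> simp <;> omega))
    rw [this]; exact hmem
  · intro hmem
    split at hmem
    · exact ⟨(q, s), List.mem_filter.mpr ⟨hmem, by simp; omega⟩, by simp; omega⟩
    · exact ⟨(s, q), List.mem_filter.mpr ⟨hmem, by simp; omega⟩, by simp⟩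

theorem isIndep_append (pairs : List (Int × Int)) (q s : Int) (sel : List Int) :
    spA_isIndep pairs q (sel ++ [s]) =
      (spA_isIndep pairs q sel && pairs.contains (spA_pair q s)) := by
  induction sel with
  | nil => simp [spA_isIndep]
  | cons o rest ih =>
    simp only [List.cons_append, spA_isIndep]
    split <;> simp [ih]

theorem contains_inter (s t : PySem.Set Int) (q : Int) :
    (PySem.Set.inter s t).contains q = (s.contains q && t.contains q) := by
  simp [PySem.Set.inter, PySem.Set.contains]

theorem loop_eq (pairs : List (Int × Int)) (mc : Int) :
    ∀ (rest : List Int) (sel : List Int) (allowed : Option (PySem.Set Int)),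
      (∀ q, spB_admits allowed q = spA_isIndep pairs q sel) →
      spA_loop pairs mc sel rest = spB_loop pairs mc sel allowed rest := by
  intro rest
  induction rest with
  | nil => intro sel allowed _; rfl
  | cons p rest ih =>
    intro sel allowed hinv
    simp only [spA_loop, spB_loop, ← hinv p]
    split
    · rfl
    · split
      · rename_i hadm
        apply ih
        intro q
        cases allowed with
        | none =>
          simp only [spB_admits, contains_nbrs, isIndep_append, ← hinv q, spB_admits,
            Bool.true_and]
        | some s =>
          simp only [spB_admits, contains_inter, contains_nbrs, isIndep_append, ← hinv q,
            spB_admits]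
      · exact ih sel allowed hinv

-- ===== VERDICT (by name: the statement is the Claim_ definition above) =====
theorem select_parallel_priorities_py_spec : Claim_equal_select_parallel_priorities_py := by
  intro ids pairs mc _
  unfold Spec_select_parallel_priorities_py select_parallel_priorities_py
    select_parallel_priorities_py_alt
  exact loop_eq pairs mc ids [] none (fun q => rfl)
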